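-- pv_equiv track=rewrite | github.com/CodyNing/HammingCode | hamming_correct.py | ba2data
-- ===== SOURCE A (Python) =====
-- def ba2data(ba):
--     plen = 0
--     hlen = 0
--     ps = []
--     data = []
--     while hlen < len(ba):
--         diff = 2 ** plen
--         ps.append(ba[hlen])
--         for i in range(hlen + 1, min(hlen + diff, len(ba))):
--             data.append(ba[i])
--         plen += 1
--         hlen += diff
--
--     data = ''.join(['1' if b else '0' for b in data])
--     ps = ''.join(['1' if b else '0' for b in ps])
--     return ps, data
-- ===== SOURCE B (Python) =====
-- def ba2data(ba):
--     # single flat pass: index i holds a parity bit iff i+1 is a power of two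
--     ps = []
--     data = []
--     for i, b in enumerate(ba):
--         (ps if (i + 1) & i == 0 else data).append('1' if b else '0')
--     return ''.join(ps), ''.join(data)
-- ===== Notes on version B (the rewrite author's own statement) =====
-- stated objective: idiomatic
-- what changed: Replaced the nested doubling while/for loop (block of 2^plen per step) with one flat enumerate pass classifying each index by the power-of-two test (i+1)&i==0, building the two strings directly.
import Mathlib
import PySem

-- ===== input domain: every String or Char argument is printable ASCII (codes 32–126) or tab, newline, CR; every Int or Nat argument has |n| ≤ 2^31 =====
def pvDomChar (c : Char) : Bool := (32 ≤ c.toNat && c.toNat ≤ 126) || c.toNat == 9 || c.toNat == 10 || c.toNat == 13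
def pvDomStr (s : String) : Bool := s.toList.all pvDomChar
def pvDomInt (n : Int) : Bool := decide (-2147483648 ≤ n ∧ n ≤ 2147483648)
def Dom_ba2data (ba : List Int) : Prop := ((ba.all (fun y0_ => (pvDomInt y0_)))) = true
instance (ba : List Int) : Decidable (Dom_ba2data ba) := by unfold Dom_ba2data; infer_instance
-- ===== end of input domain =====

-- B replaces A's nested doubling while/for loop by one flat enumerate pass that classifies
-- each index with the power-of-two test (i+1)&i==0 (objective: idiomatic, same O(n) cost).

-- ===== PORT A =====
-- the while loop; ba[hlen] and ba[i] are in range whenever read, so pyGetD is exact here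
def ba2dataLoop (ba : List Int) (plen hlen : Nat) (ps data : List Int) : List Int × List Int :=
  if hlen < ba.length then
    let diff : Nat := 2 ^ plen
    let ps' := ps ++ [PySem.List.pyGetD ba (hlen : Int) 0]
    let data' := data ++
      (PySem.List.pyRange ((hlen : Int) + 1) (min ((hlen : Int) + (diff : Int)) (ba.length : Int)) 1).map
        (fun i => PySem.List.pyGetD ba i 0)
    ba2dataLoop ba (plen + 1) (hlen + diff) ps' data'
  else (ps, data)
termination_by ba.length - hlen
decreasing_by
  have : 1 ≤ 2 ^ plen := Nat.one_le_two_pow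
  omega

def ba2data (ba : List Int) : String × String :=
  let r := ba2dataLoop ba 0 0 [] []
  (String.mk (r.1.map (fun b => if b ≠ 0 then '1' else '0')),
   String.mk (r.2.map (fun b => if b ≠ 0 then '1' else '0')))

-- ===== PORT B =====
-- (i+1) & i == 0 on a Python int i; exact for i ≥ 0, and enumerate indices are ≥ 0
def pvIsParityIdx (i : Int) : Bool := ((i + 1).toNat &&& i.toNat) == 0

-- the body of B's for loop: append '1'/'0' to the parity or the data accumulator
def pvStep (acc : List Char × List Char) (pr : Int × Int) : List Char × List Char :=
  let c := if pr.2 ≠ 0 then '1' else '0'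
  if pvIsParityIdx pr.1 then (acc.1 ++ [c], acc.2) else (acc.1, acc.2 ++ [c])

def ba2data_alt (ba : List Int) : String × String :=
  let acc := (PySem.List.enumerate ba 0).foldl pvStep ([], [])
  (String.mk acc.1, String.mk acc.2)

-- ===== PRECONDITION & SPEC =====
def Spec_ba2data (ba : List Int) (out : String × String) : Prop := out = ba2data_alt ba
instance (ba : List Int) (out : String × String) : Decidable (Spec_ba2data ba out) := by unfold Spec_ba2data; infer_instance

-- ===== CLAIM (what is proved, stated in full; the proofs are below) =====
def Claim_equal_ba2data : Prop := ∀ (ba : List Int), Dom_ba2data ba → Spec_ba2data ba (ba2data ba)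

-- ===== LEMMAS AND PROOFS =====

theorem pvLandPow (k : Nat) : (2 ^ k &&& (2 ^ k - 1)) = 0 := by
  apply Nat.eq_of_testBit_eq
  intro i
  simp

theorem pvTestBitOf (k n : Nat) (h1 : 2 ^ k ≤ n) (h2 : n < 2 ^ (k + 1)) : n.testBit k = true := by
  have e : n / 2 ^ k = 1 := Nat.div_eq_of_lt_le (by omega) (by rw [pow_succ] at h2; omega)
  simp [Nat.testBit, Nat.shiftRight_eq_div_pow, e]

theorem pvLandMid (k m : Nat) (h1 : 2 ^ k < m + 1) (h2 : m + 1 < 2 ^ (k + 1)) :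
    ((m + 1) &&& m) ≠ 0 := by
  intro h
  have ht : ((m + 1) &&& m).testBit k = true := by
    rw [Nat.testBit_and]
    rw [pvTestBitOf k (m + 1) (by omega) h2,
        pvTestBitOf k m (by omega) (by omega)]
    rfl
  rw [h] at ht
  simp at ht

theorem pvParity_true (plen : Nat) : pvIsParityIdx (((2 ^ plen - 1 : Nat) : Int)) = true := by
  have h1 : 1 ≤ 2 ^ plen := Nat.one_le_two_pow
  unfold pvIsParityIdx
  have e1 : (((2 ^ plen - 1 : Nat) : Int) + 1).toNat = 2 ^ plen := by omega
  have e2 : (((2 ^ plen - 1 : Nat) : Int)).toNat = 2 ^ plen - 1 := by omega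
  rw [e1, e2]
  simp [pvLandPow plen]

theorem pvParity_false (plen : Nat) (j : Int)
    (hl : ((2 ^ plen - 1 : Nat) : Int) < j) (hr : j < ((2 ^ plen - 1 : Nat) : Int) + (2 ^ plen : Nat)) :
    pvIsParityIdx j = false := by
  have h1 : 1 ≤ 2 ^ plen := Nat.one_le_two_pow
  have hj0 : 0 ≤ j := by omega
  have e1 : (j + 1).toNat = j.toNat + 1 := by omega
  unfold pvIsParityIdx
  rw [e1]
  have := pvLandMid plen j.toNat (by omega) (by rw [pow_succ]; omega)
  simpa using this

-- the common spec: the bits at parity / non-parity indices of [a, len), as Int lists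
theorem ba2dataLoop_eq (ba : List Int) (plen hlen : Nat) (ps data : List Int)
    (hinv : hlen + 1 = 2 ^ plen) :
    ba2dataLoop ba plen hlen ps data =
      (ps ++ ((PySem.List.pyRange (hlen : Int) (ba.length : Int) 1).filter pvIsParityIdx).map
          (fun i => PySem.List.pyGetD ba i 0),
       data ++ ((PySem.List.pyRange (hlen : Int) (ba.length : Int) 1).filter
          (fun i => !pvIsParityIdx i)).map (fun i => PySem.List.pyGetD ba i 0)) := by
  induction h : ba.length - hlen using Nat.strong_induction_on generalizing plen hlen ps data with
  | _ fuel IH =>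
  rw [ba2dataLoop.eq_def]
  by_cases hlt : hlen < ba.length
  · simp only [hlt, if_true]
    have hpow : 1 ≤ 2 ^ plen := Nat.one_le_two_pow
    have hhl : hlen = 2 ^ plen - 1 := by omega
    set m : Int := min ((hlen : Int) + ((2 ^ plen : Nat) : Int)) (ba.length : Int) with hm
    have hm1 : (hlen : Int) < m := by
      simp only [hm, lt_min_iff]
      constructor <;> [omega; exact_mod_cast hlt]
    have hm2 : m ≤ (ba.length : Int) := min_le_right _ _
    have hm3 : m ≤ (hlen : Int) + ((2 ^ plen : Nat) : Int) := min_le_left _ _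
    -- split [hlen, len) = [hlen, m) ++ [m, len)
    rw [PySem.List.pyRange_one_append (hlen : Int) m (ba.length : Int) (le_of_lt hm1) hm2]
    -- peel off hlen from the first block
    rw [PySem.List.pyRange_one_cons hm1]
    have hp : pvIsParityIdx (hlen : Int) = true := by rw [hhl]; exact_mod_cast pvParity_true plen
    have hnp : ∀ j ∈ PySem.List.pyRange ((hlen : Int) + 1) m 1, pvIsParityIdx j = false := by
      intro j hj
      rw [PySem.List.mem_pyRange_one] at hj
      refine pvParity_false plen j ?_ ?_
      · rw [← hhl]; omega
      · rw [← hhl]; exact lt_of_lt_of_le hj.2 hm3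
    have hfp : (PySem.List.pyRange ((hlen : Int) + 1) m 1).filter pvIsParityIdx = [] := by
      rw [List.filter_eq_nil_iff]
      intro j hj
      simp [hnp j hj]
    have hfnp : (PySem.List.pyRange ((hlen : Int) + 1) m 1).filter (fun i => !pvIsParityIdx i) =
        PySem.List.pyRange ((hlen : Int) + 1) m 1 := by
      rw [List.filter_eq_self]
      intro j hj
      simp [hnp j hj]
    have hstep : hlen + 2 ^ plen + 1 = 2 ^ (plen + 1) := by rw [pow_succ]; omega
    rw [IH (ba.length - (hlen + 2 ^ plen)) (by omega) (plen + 1) (hlen + 2 ^ plen) _ _ hstep rfl]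
    have hr2 : PySem.List.pyRange (((hlen + 2 ^ plen : Nat)) : Int) (ba.length : Int) 1 =
        PySem.List.pyRange m (ba.length : Int) 1 := by
      by_cases hc : (hlen : Int) + ((2 ^ plen : Nat) : Int) ≤ (ba.length : Int)
      · have : m = (hlen : Int) + ((2 ^ plen : Nat) : Int) := min_eq_left hc
        rw [this]; push_cast; ring_nf
      · have hcl : (ba.length : Int) < (hlen : Int) + ((2 ^ plen : Nat) : Int) := not_le.mp hc
        have hml : m = (ba.length : Int) := min_eq_right hcl.le
        rw [hml, PySem.List.pyRange_one_eq_nil (by exact_mod_cast hcl.le),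
            PySem.List.pyRange_one_eq_nil le_rfl]
    rw [hr2]
    simp only [List.filter_append, List.filter_cons, hp, if_true, hfp, hfnp,
      List.map_append, List.map_cons, List.map_nil]
    simp [List.append_assoc]
  · simp only [hlt, if_false]
    have : PySem.List.pyRange (hlen : Int) (ba.length : Int) 1 = [] :=
      PySem.List.pyRange_one_eq_nil (by exact_mod_cast Nat.le_of_not_lt hlt)
    simp [this]

-- B's fold partitions the enumerated list by pvIsParityIdx
theorem pvFoldPart (l : List (Int × Int)) (a b : List Char) :
    l.foldl pvStep (a, b) =
      (a ++ (l.filter (fun pr => pvIsParityIdx pr.1)).map (fun pr => if pr.2 ≠ 0 then '1' else '0'),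
       b ++ (l.filter (fun pr => !pvIsParityIdx pr.1)).map (fun pr => if pr.2 ≠ 0 then '1' else '0')) := by
  induction l generalizing a b with
  | nil => simp
  | cons x xs ih =>
    by_cases hx : pvIsParityIdx x.1
    · have hstep : pvStep (a, b) x = (a ++ [if x.2 ≠ 0 then '1' else '0'], b) := by
        simp [pvStep, hx]
      rw [List.foldl_cons, hstep, ih]
      simp [hx, List.append_assoc]
    · have hstep : pvStep (a, b) x = (a, b ++ [if x.2 ≠ 0 then '1' else '0']) := by
        simp [pvStep, hx]
      rw [List.foldl_cons, hstep, ih]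
      simp [hx, List.append_assoc]

-- ===== VERDICT (by name: the statement is the Claim_ definition above) =====
theorem ba2data_spec : Claim_equal_ba2data := by
  intro ba _
  unfold Spec_ba2data ba2data ba2data_alt
  rw [ba2dataLoop_eq ba 0 0 [] [] (by norm_num)]
  rw [PySem.List.enumerate_eq_map_pyRange ba 0]
  rw [pvFoldPart]
  simp only [List.filter_map, List.map_map, List.nil_append, Nat.cast_zero]
  simp [Function.comp_def]
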